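-- pv_equiv track=rewrite | github.com/FlorianWieser1/ELEN_paper | elen/scripts/experiments/plot_feature_barcharts.py | get_ordered_labels
-- ===== SOURCE A (Python) =====
-- def get_ordered_labels(labels):
--     # Sort labels putting 'none' first if present,
--     # then 'all' (combined features) second if present,
--     # then the rest sorted alphabetically.
--     new_labels = []
--     labels_set = set(labels)
--
--     if 'none' in labels_set:
--         new_labels.append('none')
--
--     # Detect combined feature sets (labels containing commas)
--     all_label = None
--     combined_labels = [lbl for lbl in labels_set if ',' in lbl]
--     if combined_labels:
--         # There could be multiple combined labels, but here we treat all as one "All"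
--         # Pick one combined label to represent the "All" bar
--         # (You can only have one "All" bar, so pick the first sorted)
--         all_label = sorted(combined_labels)[0]
--         new_labels.append(all_label)
--
--     # Add all other single feature labels (without comma and not none)
--     for lbl in sorted(lbl for lbl in labels_set if lbl not in ['none', all_label]):
--         new_labels.append(lbl)
--
--     return new_labels
-- ===== SOURCE B (Python) =====
-- def _insort(xs, x):
--     # insert x into the sorted list xs in place, keeping it sorted
--     i = 0
--     while i < len(xs) and xs[i] <= x:
--         i += 1
--     xs.insert(i, x)
--
--
-- def get_ordered_labels(labels):
--     # Single streaming pass: dedupe on the fly, track the 'none' flag and the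
--     # best (smallest) comma-label, and keep every other label in an
--     # insertion-sorted accumulator; never calls sorted().
--     seen = set()
--     has_none = False
--     best = None
--     rest = []
--     for lbl in labels:
--         if lbl in seen:
--             continue
--         seen.add(lbl)
--         if lbl == 'none':
--             has_none = True
--         elif ',' in lbl:
--             if best is None:
--                 best = lbl
--             elif lbl < best:
--                 _insort(rest, best)
--                 best = lbl
--             else:
--                 _insort(rest, lbl)
--         else:
--             _insort(rest, lbl)
--     out = ['none'] if has_none else []
--     if best is not None:
--         out.append(best)
--     return out + rest
-- ===== Notes on version B (the rewrite author's own statement) =====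
-- stated objective: alternative
-- what changed: A dedupes with set() and then makes three staged passes (membership test for 'none', filter+sort+index to pick the combined label, filter+sort for the rest); B is a single streaming pass that dedupes on the fly and maintains a 'none' flag, the current smallest comma-label (demoting a displaced candidate), and an insertion-sorted accumulator for everything else, never calling sorted().
import Mathlib
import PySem

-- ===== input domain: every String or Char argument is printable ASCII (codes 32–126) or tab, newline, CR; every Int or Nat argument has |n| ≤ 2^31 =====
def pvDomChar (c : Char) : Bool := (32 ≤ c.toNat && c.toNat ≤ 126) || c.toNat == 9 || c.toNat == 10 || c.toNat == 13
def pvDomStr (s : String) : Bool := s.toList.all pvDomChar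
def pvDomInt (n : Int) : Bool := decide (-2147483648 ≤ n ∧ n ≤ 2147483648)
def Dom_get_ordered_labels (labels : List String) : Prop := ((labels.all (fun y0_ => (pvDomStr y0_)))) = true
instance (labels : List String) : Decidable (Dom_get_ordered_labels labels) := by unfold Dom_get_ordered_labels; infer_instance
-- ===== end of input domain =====

-- B replaces A's staged passes (dedupe, filter+sort+index, filter+sort) with one streaming pass
-- that dedupes on the fly and keeps an insertion-sorted accumulator; objective: alternative.

-- ===== PORT A =====
def get_ordered_labels (labels : List String) : List String :=
  let labelsSet : PySem.Set String := PySem.Set.ofList labels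
  let newLabels : List String :=
    if PySem.Set.contains labelsSet "none" then [] ++ ["none"] else []
  let combinedLabels : List String := labelsSet.filter (fun lbl => PySem.Str.isIn "," lbl)
  let allLabel : Option String :=
    if combinedLabels = [] then none
    else PySem.List.pyGet? (PySem.List.sorted combinedLabels (fun x => x)) 0
  let newLabels2 : List String :=
    match allLabel with
    | some a => newLabels ++ [a]
    | none => newLabels
  (PySem.List.sorted (labelsSet.filter (fun lbl => !(lbl == "none" || some lbl == allLabel)))
      (fun x => x)).foldl (fun acc lbl => acc ++ [lbl]) newLabels2

-- ===== PORT B =====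
-- _insort: insert x into the sorted list, after all elements ≤ x (Source B's while loop)
def pvInsort (x : String) : List String → List String
  | [] => [x]
  | y :: ys => if y ≤ x then y :: pvInsort x ys else x :: y :: ys

-- the body of Source B's for-loop; state = (seen, has_none, best, rest)
def pvStep (st : PySem.Set String × Bool × Option String × List String) (lbl : String) :
    PySem.Set String × Bool × Option String × List String :=
  let (seen, hn, best, rest) := st
  if PySem.Set.contains seen lbl then st
  else
    let seen' := PySem.Set.add seen lbl
    if lbl == "none" then (seen', true, best, rest)
    else if PySem.Str.isIn "," lbl then
      match best with
      | none => (seen', hn, some lbl, rest)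
      | some b =>
        if lbl < b then (seen', hn, some lbl, pvInsort b rest)
        else (seen', hn, some b, pvInsort lbl rest)
    else (seen', hn, best, pvInsort lbl rest)

def get_ordered_labels_alt (labels : List String) : List String :=
  let st := labels.foldl pvStep (PySem.Set.empty, false, none, ([] : List String))
  let out : List String := if st.2.1 then ["none"] else []
  let out2 : List String :=
    match st.2.2.1 with
    | some b => out ++ [b]
    | none => out
  out2 ++ st.2.2.2

-- ===== PRECONDITION & SPEC =====
def Spec_get_ordered_labels (labels : List String) (out : List String) : Prop := out = get_ordered_labels_alt labels
instance (labels : List String) (out : List String) : Decidable (Spec_get_ordered_labels labels out) := by unfold Spec_get_ordered_labels; infer_instance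

-- ===== CLAIM (what is proved, stated in full; the proofs are below) =====
def Claim_equal_get_ordered_labels : Prop := ∀ (labels : List String), Dom_get_ordered_labels labels → Spec_get_ordered_labels labels (get_ordered_labels labels)

-- ===== LEMMAS AND PROOFS =====

theorem mem_pvInsort (a x : String) (ys : List String) :
    a ∈ pvInsort x ys ↔ a = x ∨ a ∈ ys := by
  induction ys with
  | nil => simp [pvInsort]
  | cons y ys ih =>
      by_cases h : y ≤ x
      · simp only [pvInsort, if_pos h, List.mem_cons, ih]
        tauto
      · simp only [pvInsort, if_neg h, List.mem_cons]

theorem pairwise_pvInsort (x : String) (ys : List String)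
    (hs : ys.Pairwise (· < ·)) (hx : x ∉ ys) : (pvInsort x ys).Pairwise (· < ·) := by
  induction ys with
  | nil => simp [pvInsort]
  | cons y ys ih =>
      rcases List.pairwise_cons.mp hs with ⟨hy, hys⟩
      by_cases h : y ≤ x
      · have hxy : y < x := lt_of_le_of_ne h (by rintro rfl; exact hx List.mem_cons_self)
        rw [pvInsort, if_pos h]
        refine List.pairwise_cons.mpr ⟨?_, ih hys (fun h' => hx (List.mem_cons_of_mem _ h'))⟩
        intro a ha
        rcases (mem_pvInsort a x ys).mp ha with rfl | ha
        · exact hxy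
        · exact hy a ha
      · rw [pvInsort, if_neg h]
        exact List.pairwise_cons.mpr ⟨fun a ha => by
          rcases List.mem_cons.mp ha with rfl | ha
          · exact lt_of_not_ge h
          · exact lt_trans (lt_of_not_ge h) (hy a ha), hs⟩

-- A's sorted(xs)[0] is the first minimal element of xs.
theorem pyGet_sorted_zero_eq_min? (xs : List String) :
    PySem.List.pyGet? (PySem.List.sorted xs (fun x => x)) 0
      = PySem.List.min? xs (fun x => x) := by
  have hhead : ∀ (ys : List String), PySem.List.pyGet? ys 0 = ys.head? := by
    intro ys; cases ys <;> simp [PySem.List.pyGet?, PySem.List.pyIdx?]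
  rw [hhead]
  cases h : PySem.List.sorted xs (fun x => x) with
  | nil =>
      have hx : xs = [] := (PySem.List.sorted_eq_nil_iff xs (fun x => x) false).mp h
      exact ((PySem.List.min?_eq_none_iff xs (fun x => x)).mpr hx).symm
  | cons m t =>
      have hxne : xs ≠ [] := by
        intro hx
        have hnil : PySem.List.sorted xs (fun x => x) = [] :=
          (PySem.List.sorted_eq_nil_iff xs (fun x => x) false).mpr hx
        rw [hnil] at h
        exact absurd h.symm (List.cons_ne_nil m t)
      cases h' : PySem.List.min? xs (fun x => x) with
      | none => exact absurd ((PySem.List.min?_eq_none_iff xs (fun x => x)).mp h') hxne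
      | some m' =>
          have hm_mem : m ∈ xs := by
            have : m ∈ PySem.List.sorted xs (fun x => x) := by rw [h]; exact List.mem_cons_self
            exact (PySem.List.mem_sorted xs (fun x => x) false m).mp this
          have h1 : m ≤ m' := PySem.List.key_head_sorted_le xs (fun x => x) h m' (PySem.List.min?_mem h')
          have h2 : m' ≤ m := PySem.List.min?_isMin h' m hm_mem
          simp [le_antisymm h1 h2]

-- The invariant of B's streaming fold, relative to the set s of labels seen so far.
def pvInv (s : PySem.Set String) (st : PySem.Set String × Bool × Option String × List String) : Prop :=
  st.1 = s ∧
  st.2.1 = PySem.Set.contains s "none" ∧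
  (∀ x, st.2.2.1 = some x →
      x ∈ s ∧ PySem.Str.isIn "," x = true ∧ ∀ y ∈ s, PySem.Str.isIn "," y = true → x ≤ y) ∧
  (st.2.2.1 = none → ∀ x ∈ s, ¬ PySem.Str.isIn "," x = true) ∧
  st.2.2.2.Pairwise (· < ·) ∧
  (∀ x, x ∈ st.2.2.2 ↔ (x ∈ s ∧ x ≠ "none" ∧ some x ≠ st.2.2.1))

theorem pvStep_inv (s : PySem.Set String) (st) (l : String) (h : pvInv s st) :
    pvInv (PySem.Set.add s l) (pvStep st l) := by
  obtain ⟨hseen, hn, hbs, hbn, hsort, hmem⟩ := h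
  obtain ⟨seen, hnb, best, rest⟩ := st
  simp only at hseen hn hbs hbn hsort hmem
  subst hseen
  by_cases hcm : l ∈ seen
  · have hadd : PySem.Set.add seen l = seen := by
      simp [PySem.Set.add, PySem.Set.contains, hcm]
    have hst : pvStep (seen, hnb, best, rest) l = (seen, hnb, best, rest) := by
      simp [pvStep, PySem.Set.contains, hcm]
    rw [hadd, hst]
    exact ⟨rfl, hn, hbs, hbn, hsort, hmem⟩
  · have hmem_add : ∀ x, x ∈ PySem.Set.add seen l ↔ (x ∈ seen ∨ x = l) := by
      intro x; simp [PySem.Set.add, PySem.Set.contains, hcm]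
    by_cases hnone : l = "none"
    · subst hnone
      have hst : pvStep (seen, hnb, best, rest) "none"
          = (PySem.Set.add seen "none", true, best, rest) := by
        simp [pvStep, PySem.Set.contains, hcm]
      rw [hst]
      refine ⟨rfl, ?_, ?_, ?_, hsort, ?_⟩
      · simp [PySem.Set.contains, hmem_add]
      · intro x hx
        obtain ⟨h1, h2, h3⟩ := hbs x hx
        refine ⟨(hmem_add x).mpr (Or.inl h1), h2, ?_⟩
        intro y hy hyc
        rcases (hmem_add y).mp hy with hy' | rfl
        · exact h3 y hy' hyc
        · exact absurd hyc (by decide)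
      · intro hx x hxs
        rcases (hmem_add x).mp hxs with hx' | rfl
        · exact hbn hx x hx'
        · decide
      · intro x
        rw [hmem x, hmem_add x]
        constructor
        · rintro ⟨h1, h2, h3⟩; exact ⟨Or.inl h1, h2, h3⟩
        · rintro ⟨h1 | rfl, h2, h3⟩
          · exact ⟨h1, h2, h3⟩
          · exact absurd rfl h2
    · have hnone2 : "none" ≠ l := Ne.symm hnone
      have hnb' : (l == "none") = false := by simpa using hnone
      have hn' : hnb = PySem.Set.contains (PySem.Set.add seen l) "none" := by
        simpa [PySem.Set.contains, hmem_add, hnone2] using hn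
      by_cases hci : PySem.Str.isIn "," l = true
      · have hci2 : PySem.Chars.isIn [','] l.toList = true := by
          simpa [PySem.Str.isIn] using hci
        cases best with
        | none =>
            have hst : pvStep (seen, hnb, none, rest) l
                = (PySem.Set.add seen l, hnb, some l, rest) := by
              simp [pvStep, PySem.Set.contains, hcm, hnb', hci2]
            rw [hst]
            refine ⟨rfl, hn', ?_, by simp, hsort, ?_⟩
            · rintro x hx
              injection hx with hx; subst hx
              refine ⟨(hmem_add l).mpr (Or.inr rfl), hci, ?_⟩
              intro y hy hyc
              rcases (hmem_add y).mp hy with hy' | rfl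
              · exact absurd hyc (hbn rfl y hy')
              · exact le_refl _
            · intro x
              rw [hmem x, hmem_add x]
              constructor
              · rintro ⟨h1, h2, -⟩
                exact ⟨Or.inl h1, h2, by rintro h'; injection h' with h'; exact hcm (h' ▸ h1)⟩
              · rintro ⟨h1 | rfl, h2, h3⟩
                · exact ⟨h1, h2, by simp⟩
                · simp at h3
        | some b =>
            obtain ⟨hbmem, hbcomma, hbmin⟩ := hbs b rfl
            have hbne : l ≠ b := by rintro rfl; exact hcm hbmem
            have hbrest : b ∉ rest := by
              intro h'; exact ((hmem b).mp h').2.2 rfl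
            have hlrest : l ∉ rest := by
              intro h'; exact hcm ((hmem l).mp h').1
            by_cases hlt : l < b
            · have hst : pvStep (seen, hnb, some b, rest) l
                  = (PySem.Set.add seen l, hnb, some l, pvInsort b rest) := by
                have hlt2 : l.toList < b.toList := by simpa using hlt
                simp [pvStep, PySem.Set.contains, hcm, hnb', hci2, hlt2]
              rw [hst]
              refine ⟨rfl, hn', ?_, by simp, pairwise_pvInsort b rest hsort hbrest, ?_⟩
              · rintro x hx
                injection hx with hx; subst hx
                refine ⟨(hmem_add l).mpr (Or.inr rfl), hci, ?_⟩
                intro y hy hyc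
                rcases (hmem_add y).mp hy with hy' | rfl
                · exact le_trans (le_of_lt hlt) (hbmin y hy' hyc)
                · exact le_refl _
              · intro x
                rw [mem_pvInsort, hmem x, hmem_add x]
                have hbn2 : b ≠ "none" := by
                  rintro rfl; exact absurd hbcomma (by decide)
                constructor
                · rintro (rfl | ⟨h1, h2, h3⟩)
                  · exact ⟨Or.inl hbmem, hbn2, by simpa using (Ne.symm hbne)⟩
                  · refine ⟨Or.inl h1, h2, ?_⟩
                    rintro h'; injection h' with h'; exact hcm (h' ▸ h1)
                · rintro ⟨h1 | rfl, h2, h3⟩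
                  · by_cases hxb : x = b
                    · exact Or.inl hxb
                    · exact Or.inr ⟨h1, h2, by simpa using hxb⟩
                  · simp at h3
            · have hst : pvStep (seen, hnb, some b, rest) l
                  = (PySem.Set.add seen l, hnb, some b, pvInsort l rest) := by
                have hlt2 : ¬ l.toList < b.toList := by simpa using hlt
                simp [pvStep, PySem.Set.contains, hcm, hnb', hci2, hlt2]
              rw [hst]
              have hble : b ≤ l := le_of_not_gt hlt
              refine ⟨rfl, hn', ?_, by simp, pairwise_pvInsort l rest hsort hlrest, ?_⟩
              · rintro x hx
                injection hx with hx; subst hx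
                refine ⟨(hmem_add b).mpr (Or.inl hbmem), hbcomma, ?_⟩
                intro y hy hyc
                rcases (hmem_add y).mp hy with hy' | rfl
                · exact hbmin y hy' hyc
                · exact hble
              · intro x
                rw [mem_pvInsort, hmem x, hmem_add x]
                constructor
                · rintro (rfl | ⟨h1, h2, h3⟩)
                  · exact ⟨Or.inr rfl, hnone, by simpa using hbne⟩
                  · exact ⟨Or.inl h1, h2, h3⟩
                · rintro ⟨h1 | rfl, h2, h3⟩
                  · exact Or.inr ⟨h1, h2, h3⟩
                  · exact Or.inl rfl
      · have hst : pvStep (seen, hnb, best, rest) l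
            = (PySem.Set.add seen l, hnb, best, pvInsort l rest) := by
          have hci2 : ¬ PySem.Chars.isIn [','] l.toList = true := by
            simpa [PySem.Str.isIn] using hci
          simp [pvStep, PySem.Set.contains, hcm, hnb', hci2]
        rw [hst]
        have hlrest : l ∉ rest := by
          intro h'; exact hcm ((hmem l).mp h').1
        refine ⟨rfl, hn', ?_, ?_, pairwise_pvInsort l rest hsort hlrest, ?_⟩
        · intro x hx
          obtain ⟨h1, h2, h3⟩ := hbs x hx
          refine ⟨(hmem_add x).mpr (Or.inl h1), h2, ?_⟩
          intro y hy hyc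
          rcases (hmem_add y).mp hy with hy' | rfl
          · exact h3 y hy' hyc
          · exact absurd hyc hci
        · intro hx x hxs
          rcases (hmem_add x).mp hxs with hx' | rfl
          · exact hbn hx x hx'
          · exact hci
        · intro x
          rw [mem_pvInsort, hmem x, hmem_add x]
          have hlbest : some l ≠ best := by
            intro h'
            obtain ⟨-, h2, -⟩ := hbs l h'.symm
            exact hci h2
          constructor
          · rintro (rfl | ⟨h1, h2, h3⟩)
            · exact ⟨Or.inr rfl, hnone, hlbest⟩
            · exact ⟨Or.inl h1, h2, h3⟩
          · rintro ⟨h1 | rfl, h2, h3⟩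
            · exact Or.inr ⟨h1, h2, h3⟩
            · exact Or.inl rfl

theorem foldl_pvStep_inv (p : List String) (st) (s : PySem.Set String) (h : pvInv s st) :
    pvInv (p.foldl PySem.Set.add s) (p.foldl pvStep st) := by
  induction p generalizing st s with
  | nil => exact h
  | cons l p ih => exact ih _ _ (pvStep_inv s st l h)

theorem pvInv_init : pvInv PySem.Set.empty (PySem.Set.empty, false, none, ([] : List String)) := by
  refine ⟨rfl, rfl, by simp, by simp [PySem.Set.empty], by simp, by simp [PySem.Set.empty]⟩

theorem main_eq (labels : List String) :
    get_ordered_labels labels = get_ordered_labels_alt labels := by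
  unfold get_ordered_labels get_ordered_labels_alt
  rw [PySem.List.foldl_append_singleton_eq_self]
  have hfold : (labels.foldl PySem.Set.add PySem.Set.empty) = PySem.Set.ofList labels := by
    rw [PySem.Set.ofList_eq_foldl]; rfl
  have hinv := foldl_pvStep_inv labels _ _ pvInv_init
  rw [hfold] at hinv
  set s : PySem.Set String := PySem.Set.ofList labels with hs
  set st := labels.foldl pvStep (PySem.Set.empty, false, none, ([] : List String)) with hst
  obtain ⟨-, hn, hbs, hbn, hsort, hmem⟩ := hinv
  have hnd : s.Nodup := PySem.Set.nodup_ofList labels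
  -- the chosen combined label agrees
  set combined : List String := s.filter (fun lbl => PySem.Str.isIn "," lbl) with hcomb
  have hbest :
      (if combined = [] then none
       else PySem.List.pyGet? (PySem.List.sorted combined (fun x => x)) 0) = st.2.2.1 := by
    by_cases hce : combined = []
    · rw [if_pos hce]
      cases hb : st.2.2.1 with
      | none => rfl
      | some x =>
          obtain ⟨h1, h2, -⟩ := hbs x hb
          have : x ∈ combined := List.mem_filter.mpr ⟨h1, h2⟩
          rw [hce] at this; cases this
    · rw [if_neg hce, pyGet_sorted_zero_eq_min?]
      cases hm : PySem.List.min? combined (fun x => x) with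
      | none => exact absurd ((PySem.List.min?_eq_none_iff combined (fun x => x)).mp hm) hce
      | some m =>
          have hm_mem := PySem.List.min?_mem hm
          obtain ⟨hms, hmc⟩ := List.mem_filter.mp hm_mem
          cases hb : st.2.2.1 with
          | none => exact absurd (hbn hb m hms) (by simpa using hmc)
          | some x =>
              obtain ⟨h1, h2, h3⟩ := hbs x hb
              have hx_comb : x ∈ combined := List.mem_filter.mpr ⟨h1, h2⟩
              have hle1 : x ≤ m := h3 m hms (by simpa using hmc)
              have hle2 : m ≤ x := PySem.List.min?_isMin hm x hx_comb
              rw [le_antisymm hle1 hle2]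
  rw [hbest]
  -- the sorted remainder equals B's accumulator
  have hrest :
      PySem.List.sorted (s.filter (fun lbl => !(lbl == "none" || some lbl == st.2.2.1)))
          (fun x => x) = st.2.2.2 := by
    apply PySem.List.sorted_eq_of_perm_of_pairwise_lt
    · have hnd_rest : st.2.2.2.Nodup := hsort.imp ne_of_lt
      have hnd_filter : (s.filter (fun lbl => !(lbl == "none" || some lbl == st.2.2.1))).Nodup :=
        hnd.filter _
      rw [List.perm_ext_iff_of_nodup hnd_rest hnd_filter]
      intro x
      rw [hmem x, List.mem_filter]
      simp only [Bool.not_eq_eq_eq_not, Bool.not_true, Bool.or_eq_false_iff, beq_eq_false_iff_ne]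
    · exact hsort
  rw [hrest]
  -- the 'none' prefix agrees
  rw [← hn]
  cases hb : st.2.2.1 <;> simp [hb]

-- ===== VERDICT (by name: the statement is the Claim_ definition above) =====
theorem get_ordered_labels_spec : Claim_equal_get_ordered_labels := by
  intro labels _
  unfold Spec_get_ordered_labels
  exact main_eq labels
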